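-- pv_equiv track=rewrite | github.com/Aditya1016/current_affairs | app/route_harness.py | route_prompt
-- ===== SOURCE A (Python) =====
-- from typing import Dict, List
--
-- SPECIALISTS = {
--     "Friday Dev Cycle": ["full dev cycle", "implement", "verify", "ship", "repo hygiene", "ci", "build"],
--     "Friday Hook Guardian": ["pre-commit", "hooks", "lint", "format", "quality gates", "husky", "lefthook"],
--     "Friday PR Reviewer": ["pr", "pull request", "review", "risk", "release notes", "changelog"],
--     "Friday Graph Intelligence": ["graph", "cluster", "similarity", "threshold", "mermaid", "edges", "nodes"],
--     "Friday CLI UX Designer": ["ux", "ui", "prompt", "dashboard", "theme", "discoverability", "commands"],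
-- }
--
-- def route_prompt(prompt: str) -> List[str]:
--     p = prompt.lower()
--     scores: Dict[str, int] = {}
--     for specialist, keywords in SPECIALISTS.items():
--         score = 0
--         for kw in keywords:
--             if kw in p:
--                 score += 1
--         if score > 0:
--             scores[specialist] = score
--
--     if not scores:
--         return ["Friday Dev Cycle"]
--
--     ranked = sorted(scores.items(), key=lambda x: x[1], reverse=True)
--     top_score = ranked[0][1]
--     selected = [name for name, score in ranked if score == top_score]
--
--     # For multi-intent prompts, include second specialist if close enough.
--     if len(ranked) > 1 and ranked[1][1] >= max(1, top_score - 1):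
--         if ranked[1][0] not in selected:
--             selected.append(ranked[1][0])
--
--     return selected
-- ===== SOURCE B (Python) =====
-- from typing import Dict, List
--
-- SPECIALISTS = {
--     "Friday Dev Cycle": ["full dev cycle", "implement", "verify", "ship", "repo hygiene", "ci", "build"],
--     "Friday Hook Guardian": ["pre-commit", "hooks", "lint", "format", "quality gates", "husky", "lefthook"],
--     "Friday PR Reviewer": ["pr", "pull request", "review", "risk", "release notes", "changelog"],
--     "Friday Graph Intelligence": ["graph", "cluster", "similarity", "threshold", "mermaid", "edges", "nodes"],
--     "Friday CLI UX Designer": ["ux", "ui", "prompt", "dashboard", "theme", "discoverability", "commands"],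
-- }
--
-- def route_prompt(prompt: str) -> List[str]:
--     # Single pass, no dict and no sort: maintain the tied leaders, the top
--     # score and the best runner-up (first among equal scores) as we go.
--     p = prompt.lower()
--     top = 0
--     leaders: List[str] = []
--     runner = None  # best (name, score) strictly below top, first among ties
--     for specialist, keywords in SPECIALISTS.items():
--         score = sum(1 for kw in keywords if kw in p)
--         if score == 0:
--             continue
--         if score > top:
--             if top > 0:
--                 runner = (leaders[0], top)
--             top = score
--             leaders = [specialist]
--         elif score == top:
--             leaders.append(specialist)
--         elif runner is None or score > runner[1]:
--             runner = (specialist, score)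
--     if top == 0:
--         return ["Friday Dev Cycle"]
--     if len(leaders) == 1 and runner is not None and runner[1] >= max(1, top - 1):
--         return leaders + [runner[0]]
--     return leaders
-- ===== Notes on version B (the rewrite author's own statement) =====
-- stated objective: alternative
-- what changed: Replaces A's scores dict + stable descending sort + ranked[0]/ranked[1] indexing by a single pass over SPECIALISTS that maintains the running top score, the list of tied leaders and the best strictly-lower runner-up in an accumulator, then decides the result from that state.
import Mathlib
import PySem

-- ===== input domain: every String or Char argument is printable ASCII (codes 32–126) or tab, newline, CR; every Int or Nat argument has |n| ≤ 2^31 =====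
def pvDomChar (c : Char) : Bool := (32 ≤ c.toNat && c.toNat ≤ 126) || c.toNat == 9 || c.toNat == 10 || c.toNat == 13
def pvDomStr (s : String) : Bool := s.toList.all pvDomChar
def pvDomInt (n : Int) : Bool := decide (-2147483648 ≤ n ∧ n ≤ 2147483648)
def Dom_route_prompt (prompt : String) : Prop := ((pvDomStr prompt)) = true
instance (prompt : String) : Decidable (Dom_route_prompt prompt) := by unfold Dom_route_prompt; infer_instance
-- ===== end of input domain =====

-- B replaces A's scores dict + stable descending sort + ranked[0]/ranked[1] indexing by a
-- single pass that maintains the top score, the tied leaders and the best runner-up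
-- (objective: alternative, same observable behaviour).

-- ===== PORT A =====
def SPECIALISTS : List (String × List String) := [
  ("Friday Dev Cycle", ["full dev cycle", "implement", "verify", "ship", "repo hygiene", "ci", "build"]),
  ("Friday Hook Guardian", ["pre-commit", "hooks", "lint", "format", "quality gates", "husky", "lefthook"]),
  ("Friday PR Reviewer", ["pr", "pull request", "review", "risk", "release notes", "changelog"]),
  ("Friday Graph Intelligence", ["graph", "cluster", "similarity", "threshold", "mermaid", "edges", "nodes"]),
  ("Friday CLI UX Designer", ["ux", "ui", "prompt", "dashboard", "theme", "discoverability", "commands"])]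

-- the part of A after the scores dict is built: sort the items by score, stable, descending;
-- `match sorted … with | [] =>` is Python's `if not scores:` (sorted(xs) == [] iff xs == [])
def pvTailA (items : List (String × Int)) : List String :=
  match PySem.List.sorted items (fun x => x.2) true with
  | [] => ["Friday Dev Cycle"]
  | (n0, s0) :: rest =>
    let selected := (((n0, s0) :: rest).filter (fun x => x.2 == s0)).map Prod.fst
    match rest with
    | [] => selected
    | (n1, s1) :: _ =>
      if max 1 (s0 - 1) ≤ s1 then
        if !(selected.contains n1) then selected ++ [n1] else selected
      else selected

def route_prompt (prompt : String) : List String :=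
  let p := PySem.Str.lower prompt
  let scores : PySem.Dict String Int :=
    SPECIALISTS.foldl (fun d sk =>
      let score : Int := sk.2.foldl (fun s kw => if PySem.Str.isIn kw p then s + 1 else s) 0
      if 0 < score then d.insert sk.1 score else d) PySem.Dict.empty
  pvTailA scores.items

-- ===== PORT B =====
-- one loop step of Source B: state = (top, leaders, runner).
-- Python's `leaders[0]` is guarded by `top > 0`, under which leaders is provably nonempty,
-- so `headD ""` is exact on every reachable state.
def pvStepB (st : Int × List String × Option (String × Int)) (name : String) (score : Int) :
    Int × List String × Option (String × Int) :=
  if score == 0 then st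
  else if st.1 < score then
    (score, [name], if 0 < st.1 then some (st.2.1.headD "", st.1) else st.2.2)
  else if score == st.1 then (st.1, st.2.1 ++ [name], st.2.2)
  else match st.2.2 with
    | none => (st.1, st.2.1, some (name, score))
    | some r => if r.2 < score then (st.1, st.2.1, some (name, score)) else st

-- Source B's code after the loop
def pvFinishB (st : Int × List String × Option (String × Int)) : List String :=
  if st.1 == 0 then ["Friday Dev Cycle"]
  else if st.2.1.length == 1 then
    match st.2.2 with
    | some r => if max 1 (st.1 - 1) ≤ r.2 then st.2.1 ++ [r.1] else st.2.1
    | none => st.2.1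
  else st.2.1

def route_prompt_alt (prompt : String) : List String :=
  let p := PySem.Str.lower prompt
  pvFinishB (SPECIALISTS.foldl (fun st sk =>
    pvStepB st sk.1 ((sk.2.countP (fun kw => PySem.Str.isIn kw p) : Nat) : Int))
    ((0 : Int), ([] : List String), (none : Option (String × Int))))

-- ===== PRECONDITION & SPEC =====
def Spec_route_prompt (prompt : String) (out : List String) : Prop := out = route_prompt_alt prompt
instance (prompt : String) (out : List String) : Decidable (Spec_route_prompt prompt out) := by unfold Spec_route_prompt; infer_instance

-- ===== CLAIM (what is proved, stated in full; the proofs are below) =====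
def Claim_equal_route_prompt : Prop := ∀ (prompt : String), Dom_route_prompt prompt → Spec_route_prompt prompt (route_prompt prompt)

-- ===== LEMMAS AND PROOFS =====

-- the list of (name, positive score) pairs, in SPECIALISTS order (proof-layer view of A's dict)
def pvItems (f : String × List String → Int) (L : List (String × List String)) : List (String × Int) :=
  L.filterMap (fun sk => if 0 < f sk then some (sk.1, f sk) else none)

def pvTop (items : List (String × Int)) : Int :=
  match PySem.List.max? items (fun x => x.2) with | none => 0 | some m => m.2

def pvLeaders (items : List (String × Int)) : List String :=
  (items.filter (fun x => x.2 == pvTop items)).map Prod.fst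

def pvRunner (items : List (String × Int)) : Option (String × Int) :=
  PySem.List.max? (items.filter (fun x => decide (x.2 < pvTop items))) (fun it => it.2)

-- the two score computations agree
theorem score_eq (p : String) (kws : List String) :
    kws.foldl (fun s kw => if PySem.Str.isIn kw p then s + 1 else s) (0 : Int)
    = ((kws.countP (fun kw => PySem.Str.isIn kw p) : Nat) : Int) := by
  simpa using PySem.List.foldl_count_if (fun kw => PySem.Str.isIn kw p) kws 0

-- A's dict-building loop over fresh distinct keys produces exactly pvItems
theorem dict_items_eq (f : String × List String → Int) :
    ∀ (L : List (String × List String)) (d : PySem.Dict String Int),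
    (∀ sk ∈ L, sk.1 ∉ d.keys) → (L.map Prod.fst).Nodup →
    (L.foldl (fun d sk => if 0 < f sk then d.insert sk.1 (f sk) else d) d).items
      = d.items ++ pvItems f L := by
  intro L
  induction L with
  | nil => intro d _ _; simp [pvItems]
  | cons sk L ih =>
    intro d hfresh hnd
    have hskd : sk.1 ∉ d.keys := hfresh sk (List.mem_cons_self ..)
    have hndL : (L.map Prod.fst).Nodup := (List.nodup_cons.1 hnd).2
    have hskL : sk.1 ∉ L.map Prod.fst := (List.nodup_cons.1 hnd).1
    simp only [List.foldl_cons]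
    by_cases h : 0 < f sk
    · rw [if_pos h]
      have hcon : d.contains sk.1 = false := by
        rw [PySem.Dict.contains_eq_decide_mem_keys]
        simp [hskd]
      rw [ih (d.insert sk.1 (f sk)) ?_ hndL]
      · rw [PySem.Dict.items_insert, hcon]
        simp [pvItems, h]
      · intro a ha
        rw [PySem.Dict.mem_keys_insert]
        rintro (he | hmem)
        · exact hskL (he ▸ List.mem_map_of_mem ha)
        · exact hfresh a (List.mem_cons_of_mem _ ha) hmem
    · rw [if_neg h]
      rw [ih d (fun a ha => hfresh a (List.mem_cons_of_mem _ ha)) hndL]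
      simp [pvItems, h]

-- elements of pvItems have positive score
theorem pvItems_pos (f : String × List String → Int) (L : List (String × List String)) :
    ∀ x ∈ pvItems f L, 1 ≤ x.2 := by
  intro x hx
  obtain ⟨a, -, ha⟩ := List.mem_filterMap.1 hx
  by_cases h : 0 < f a
  · rw [if_pos h] at ha
    cases ha
    exact h
  · rw [if_neg h] at ha; cases ha

-- names of pvItems form a sublist of the names of L
theorem pvItems_fst_sublist (f : String × List String → Int) (L : List (String × List String)) :
    ((pvItems f L).map Prod.fst).Sublist (L.map Prod.fst) := by
  induction L with
  | nil => simp [pvItems]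
  | cons sk L ih =>
    by_cases h : 0 < f sk
    · simpa [pvItems, h] using ih.cons₂ sk.1
    · simpa [pvItems, h] using ih.cons sk.1

-- max? over xs ++ [x] is Source B's running update of the current best
theorem max?_append_singleton {α : Type} (xs : List α) (key : α → Int) (x : α) :
    PySem.List.max? (xs ++ [x]) key
    = match PySem.List.max? xs key with
      | none => some x
      | some m => if key m < key x then some x else some m := by
  cases xs with
  | nil => simp [PySem.List.max?]
  | cons y ys =>
    simp only [PySem.List.max?, List.foldl_append, List.foldl_cons, List.foldl_nil]
    rfl

-- max? returns the FIRST maximal element: it heads the filter at its own key value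
theorem max?_head_filter {α : Type} (xs : List α) (key : α → Int) (m : α)
    (h : PySem.List.max? xs key = some m) :
    ∃ t, xs.filter (fun x => key x == key m) = m :: t := by
  have aux : ∀ (ys : List α) (a b : α),
      List.foldl (fun acc x => match acc with
        | none => some x
        | some c => if key c < key x then some x else some c) (some a) ys = some b →
      (a = b ∧ ∀ x ∈ ys, ¬ key a < key x) ∨
      (key a < key b ∧ ∃ t, ys.filter (fun x => key x == key b) = b :: t) := by
    intro ys
    induction ys with
    | nil => intro a b h; left; exact ⟨by simpa using h, by simp⟩
    | cons x ys ih =>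
      intro a b h
      simp only [List.foldl_cons] at h
      by_cases hax : key a < key x
      · rw [if_pos hax] at h
        rcases ih x b h with ⟨hxb, hall⟩ | ⟨hlt, t, ht⟩
        · right
          refine ⟨hxb ▸ hax, ys.filter (fun z => key z == key b), ?_⟩
          simp [hxb]
        · right
          refine ⟨lt_trans hax hlt, t, ?_⟩
          have hne : (key x == key b) = false := by
            rw [beq_eq_false_iff_ne]; exact ne_of_lt hlt
          simp [hne, ht]
      · rw [if_neg hax] at h
        rcases ih a b h with ⟨hab, hall⟩ | ⟨hlt, t, ht⟩
        · left
          refine ⟨hab, ?_⟩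
          intro z hz
          rcases List.mem_cons.1 hz with rfl | hz'
          · exact hax
          · exact hall z hz'
        · right
          refine ⟨hlt, t, ?_⟩
          have hne : (key x == key b) = false := by
            rw [beq_eq_false_iff_ne]
            exact ne_of_lt (lt_of_le_of_lt (not_lt.1 hax) hlt)
          simp [hne, ht]
  rcases xs with _ | ⟨x, ys⟩
  · simp [PySem.List.max?] at h
  · have h' : List.foldl (fun acc x => match acc with
        | none => some x
        | some c => if key c < key x then some x else some c) (some x) ys = some m := by
      simpa [PySem.List.max?] using h
    rcases aux ys x m h' with ⟨hxm, -⟩ | ⟨hlt, t, ht⟩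
    · refine ⟨ys.filter (fun z => key z == key m), ?_⟩
      simp [hxm]
    · have hne : (key x == key m) = false := by
        rw [beq_eq_false_iff_ne]; exact ne_of_lt hlt
      exact ⟨t, by simp [hne, ht]⟩

-- every score is at most pvTop
theorem le_pvTop (I : List (String × Int)) : ∀ x ∈ I, x.2 ≤ pvTop I := by
  intro x hx
  unfold pvTop
  cases hm : PySem.List.max? I (fun x => x.2) with
  | none =>
    rw [PySem.List.max?_eq_none_iff] at hm
    rw [hm] at hx; cases hx
  | some m => exact PySem.List.max?_isMax hm x hx

-- pvTop of a nonempty positive-score list is positive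
theorem pvTop_pos (I : List (String × Int)) (hpos : ∀ x ∈ I, 1 ≤ x.2) (hne : I ≠ []) :
    1 ≤ pvTop I := by
  unfold pvTop
  cases hm : PySem.List.max? I (fun x => x.2) with
  | none => exact absurd ((PySem.List.max?_eq_none_iff _ _).1 hm) hne
  | some m => exact hpos m (PySem.List.max?_mem hm)

-- one step of Source B's loop preserves the (pvTop, pvLeaders, pvRunner) description
theorem stepB_spec (I : List (String × Int)) (hpos : ∀ x ∈ I, 1 ≤ x.2)
    (n : String) (s : Int) (hs : 0 ≤ s) :
    pvStepB (pvTop I, pvLeaders I, pvRunner I) n s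
    = (pvTop (I ++ if 0 < s then [(n, s)] else []),
       pvLeaders (I ++ if 0 < s then [(n, s)] else []),
       pvRunner (I ++ if 0 < s then [(n, s)] else [])) := by
  by_cases hs0 : s = 0
  · subst hs0
    simp [pvStepB]
  · have hspos : 0 < s := lt_of_le_of_ne hs (Ne.symm hs0)
    rw [if_pos hspos]
    have hmax := le_pvTop I
    by_cases hlt : pvTop I < s
    · -- new strict leader
      have htop' : pvTop (I ++ [(n, s)]) = s := by
        unfold pvTop
        rw [max?_append_singleton]
        cases hm : PySem.List.max? I (fun x => x.2) with
        | none => simp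
        | some m =>
          have : m.2 = pvTop I := by unfold pvTop; rw [hm]
          simp only []
          rw [if_pos (by omega)]
      have hfI : I.filter (fun x => x.2 == s) = [] := by
        rw [List.filter_eq_nil_iff]
        intro z hz
        have := hmax z hz
        simp only [beq_iff_eq]
        omega
      have hlead' : pvLeaders (I ++ [(n, s)]) = [n] := by
        unfold pvLeaders
        rw [htop', List.filter_append, hfI]
        simp
      have hrun' : pvRunner (I ++ [(n, s)]) = PySem.List.max? I (fun it => it.2) := by
        unfold pvRunner
        rw [htop', List.filter_append]
        have h1 : I.filter (fun x => decide (x.2 < s)) = I := by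
          rw [List.filter_eq_self]
          intro z hz
          have := hmax z hz
          simp; omega
        have h2 : [(n, s)].filter (fun x : String × Int => decide (x.2 < s)) = [] := by simp
        rw [h1, h2, List.append_nil]
      rw [htop', hlead', hrun']
      unfold pvStepB
      simp only []
      rw [if_neg (by simp; omega), if_pos (by simpa using hlt)]
      by_cases hI : I = []
      · subst hI
        simp [pvTop, pvRunner, PySem.List.max?]
      · have htp := pvTop_pos I hpos hI
        rw [if_pos (by simpa using htp)]
        obtain ⟨m, hm⟩ : ∃ m, PySem.List.max? I (fun x => x.2) = some m := by
          cases hm : PySem.List.max? I (fun x => x.2) with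
          | none => exact absurd ((PySem.List.max?_eq_none_iff _ _).1 hm) hI
          | some m => exact ⟨m, rfl⟩
        have hm2 : m.2 = pvTop I := by unfold pvTop; rw [hm]
        obtain ⟨t, ht⟩ := max?_head_filter I (fun x => x.2) m hm
        have hlead : pvLeaders I = m.1 :: t.map Prod.fst := by
          unfold pvLeaders
          rw [hm2] at ht
          rw [ht]
          simp
        rw [hlead, hm]
        simp [← hm2]
    · -- score does not beat the current top
      have hIne : I ≠ [] := by
        intro h
        subst h
        simp [pvTop] at hlt
        simp [PySem.List.max?] at hlt
        omega
      obtain ⟨m, hm⟩ : ∃ m, PySem.List.max? I (fun x => x.2) = some m := by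
        cases hm : PySem.List.max? I (fun x => x.2) with
        | none => exact absurd ((PySem.List.max?_eq_none_iff _ _).1 hm) hIne
        | some m => exact ⟨m, rfl⟩
      have hm2 : m.2 = pvTop I := by unfold pvTop; rw [hm]
      have htop' : pvTop (I ++ [(n, s)]) = pvTop I := by
        unfold pvTop
        rw [max?_append_singleton, hm]
        simp only []
        rw [if_neg (by omega)]
      by_cases heq : s = pvTop I
      · -- ties the top: join the leaders
        have hlead' : pvLeaders (I ++ [(n, s)]) = pvLeaders I ++ [n] := by
          unfold pvLeaders
          rw [htop', List.filter_append]
          simp [heq]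
        have hrun' : pvRunner (I ++ [(n, s)]) = pvRunner I := by
          unfold pvRunner
          rw [htop', List.filter_append]
          have : [(n, s)].filter (fun x : String × Int => decide (x.2 < pvTop I)) = [] := by
            simp; omega
          rw [this, List.append_nil]
        rw [htop', hlead', hrun']
        unfold pvStepB
        simp only []
        rw [if_neg (by simp; omega), if_neg (by simpa using hlt), if_pos (by simpa using heq)]
      · -- strictly below the top: candidate runner-up
        have hslt : s < pvTop I := lt_of_le_of_ne (not_lt.1 hlt) heq
        have hlead' : pvLeaders (I ++ [(n, s)]) = pvLeaders I := by
          unfold pvLeaders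
          rw [htop', List.filter_append]
          have : [(n, s)].filter (fun x : String × Int => x.2 == pvTop I) = [] := by
            simp; omega
          rw [this, List.append_nil]
        have hrun' : pvRunner (I ++ [(n, s)])
            = match pvRunner I with
              | none => some (n, s)
              | some r => if r.2 < s then some (n, s) else some r := by
          unfold pvRunner
          rw [htop', List.filter_append]
          have h1 : [(n, s)].filter (fun x : String × Int => decide (x.2 < pvTop I)) = [(n, s)] := by
            simp [hslt]
          rw [h1, max?_append_singleton]
          cases PySem.List.max? (I.filter (fun x => decide (x.2 < pvTop I))) (fun it => it.2) <;> rfl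
        rw [htop', hlead', hrun']
        unfold pvStepB
        simp only []
        rw [if_neg (by simp; omega), if_neg (by simpa using hlt), if_neg (by simpa using heq)]
        cases hr : pvRunner I with
        | none => simp
        | some r =>
          by_cases hrs : r.2 < s
          · simp [hrs]
          · simp [hrs]

-- Source B's loop computes exactly (pvTop, pvLeaders, pvRunner) of the scored items
theorem foldB_spec (f : String × List String → Int) (hf : ∀ sk, 0 ≤ f sk) :
    ∀ (L : List (String × List String)),
    L.foldl (fun st sk => pvStepB st sk.1 (f sk)) ((0 : Int), ([] : List String), none)
    = (pvTop (pvItems f L), pvLeaders (pvItems f L), pvRunner (pvItems f L)) := by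
  intro L
  induction L using List.reverseRecOn with
  | nil => simp [pvItems, pvTop, pvLeaders, pvRunner, PySem.List.max?]
  | append_singleton L sk ih =>
    rw [List.foldl_append, List.foldl_cons, List.foldl_nil, ih]
    have hitems : pvItems f (L ++ [sk])
        = pvItems f L ++ if 0 < f sk then [(sk.1, f sk)] else [] := by
      unfold pvItems
      rw [List.filterMap_append]
      by_cases h : 0 < f sk <;> simp [h]
    rw [hitems]
    exact stepB_spec (pvItems f L) (pvItems_pos f L) sk.1 (f sk) (hf sk)

-- insertBy for the descending sort preserves descending order
theorem pairwise_insertBy_desc (x : String × Int) (acc : List (String × Int))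
    (hs : acc.Pairwise (fun a b => b.2 ≤ a.2)) :
    (PySem.List.insertBy (fun a b => decide (b.2 < a.2)) x acc).Pairwise (fun a b => b.2 ≤ a.2) := by
  induction acc with
  | nil => simp [PySem.List.insertBy]
  | cons y ys ih =>
    rw [List.pairwise_cons] at hs
    simp only [PySem.List.insertBy]
    split_ifs with h
    · simp only [decide_eq_true_eq] at h
      refine List.Pairwise.cons ?_ (List.Pairwise.cons hs.1 hs.2)
      intro z hz
      rcases List.mem_cons.1 hz with rfl | hz'
      · exact le_of_lt h
      · exact le_trans (hs.1 z hz') (le_of_lt h)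
    · simp only [decide_eq_true_eq, not_lt] at h
      refine List.Pairwise.cons ?_ (ih hs.2)
      intro z hz
      rcases (PySem.List.mem_insertBy _ _ _ _).1 hz with rfl | hz'
      · exact h
      · exact hs.1 z hz'

-- filtering one score value through a descending insertion appends the new element iff it has that value
theorem filter_insertBy_desc (x : String × Int) (acc : List (String × Int)) (v : Int)
    (hs : acc.Pairwise (fun a b => b.2 ≤ a.2)) :
    (PySem.List.insertBy (fun a b => decide (b.2 < a.2)) x acc).filter (fun y => y.2 == v)
    = acc.filter (fun y => y.2 == v) ++ if x.2 = v then [x] else [] := by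
  induction acc with
  | nil => by_cases hv : x.2 = v <;> simp [PySem.List.insertBy, hv]
  | cons y ys ih =>
    rw [List.pairwise_cons] at hs
    simp only [PySem.List.insertBy]
    by_cases h : y.2 < x.2
    · rw [if_pos (by simpa using h)]
      by_cases hv : x.2 = v
      · have hy : ¬ y.2 = v := by omega
        have hys : ys.filter (fun z => z.2 == v) = [] := by
          rw [List.filter_eq_nil_iff]
          intro z hz
          have : z.2 ≤ y.2 := hs.1 z hz
          simp only [beq_iff_eq]
          omega
        simp [hv, hy, hys]
      · simp [List.filter_cons, hv]
    · rw [if_neg (by simpa using h)]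
      simp only [List.filter_cons, ih hs.2]
      by_cases hy : y.2 = v <;> simp [hy]

-- STABILITY of Python's sort: the elements of one score value keep their original order
theorem filter_sorted_rev (l : List (String × Int)) (v : Int) :
    (PySem.List.sorted l (fun x => x.2) true).filter (fun y => y.2 == v)
    = l.filter (fun y => y.2 == v) := by
  rw [PySem.List.sorted_rev_eq_foldl_insertBy]
  have aux : ∀ (L acc : List (String × Int)), acc.Pairwise (fun a b => b.2 ≤ a.2) →
      (L.foldl (fun acc x => PySem.List.insertBy (fun a b => decide (b.2 < a.2)) x acc) acc).filter
        (fun y => y.2 == v)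
      = acc.filter (fun y => y.2 == v) ++ L.filter (fun y => y.2 == v) := by
    intro L
    induction L with
    | nil => intro acc _; simp
    | cons x L ih =>
      intro acc hs
      simp only [List.foldl_cons]
      rw [ih _ (pairwise_insertBy_desc x acc hs), filter_insertBy_desc x acc v hs,
        List.filter_cons, List.append_assoc]
      by_cases hv : x.2 = v
      · simp [hv]
      · simp [hv]
  simpa using aux l [] (by simp)

-- the core: on a list of distinct names with positive scores, A's sort-based tail
-- agrees with Source B's finish applied to the loop state
theorem tail_eq (l : List (String × Int)) (hpos : ∀ x ∈ l, 1 ≤ x.2)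
    (hnd : (l.map Prod.fst).Nodup) :
    pvTailA l = pvFinishB (pvTop l, pvLeaders l, pvRunner l) := by
  unfold pvTailA
  cases hS : PySem.List.sorted l (fun x => x.2) true with
  | nil =>
    have hl : l = [] := (PySem.List.sorted_eq_nil_iff _ _ _).1 hS
    subst hl
    simp [pvFinishB, pvTop, PySem.List.max?]
  | cons hd rest =>
    obtain ⟨n0, s0⟩ := hd
    have hperm : ((n0, s0) :: rest).Perm l := by
      have h := PySem.List.sorted_perm l (fun x => x.2) true
      rwa [hS] at h
    have hpw : ((n0, s0) :: rest).Pairwise (fun a b => b.2 ≤ a.2) := by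
      have h := PySem.List.sorted_pairwise_rev l (fun x => x.2)
      rwa [hS] at h
    have hmax0 : ∀ y ∈ l, y.2 ≤ s0 := fun y hy =>
      PySem.List.key_head_sorted_rev_ge l (fun x => x.2) hS y hy
    have hmem0 : (n0, s0) ∈ l := hperm.mem_iff.1 (List.mem_cons_self ..)
    have hs0pos : 1 ≤ s0 := hpos _ hmem0
    have hstab : ∀ v : Int,
        ((n0, s0) :: rest).filter (fun y => y.2 == v) = l.filter (fun y => y.2 == v) := by
      intro v
      rw [← hS]
      exact filter_sorted_rev l v
    obtain ⟨m, hm⟩ : ∃ m, PySem.List.max? l (fun x => x.2) = some m := by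
      cases hmx : PySem.List.max? l (fun x => x.2) with
      | none =>
        exfalso
        have := (PySem.List.max?_eq_none_iff _ _).1 hmx
        rw [this] at hmem0
        exact List.not_mem_nil hmem0
      | some m => exact ⟨m, rfl⟩
    have hms0 : m.2 = s0 := by
      have h1 : m.2 ≤ s0 := hmax0 m (PySem.List.max?_mem hm)
      have h2 : s0 ≤ m.2 := PySem.List.max?_isMax hm (n0, s0) hmem0
      omega
    have htop : pvTop l = s0 := by unfold pvTop; rw [hm]; exact hms0
    have htop0 : (pvTop l == 0) = false := by rw [htop]; simp; omega
    cases rest with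
    | nil =>
      have hl : l = [(n0, s0)] := List.perm_singleton.1 hperm.symm
      subst hl
      have hlead : pvLeaders [(n0, s0)] = [n0] := by
        unfold pvLeaders
        rw [htop]
        simp
      have hrun : pvRunner [(n0, s0)] = none := by
        unfold pvRunner
        rw [htop]
        simp [PySem.List.max?]
      unfold pvFinishB
      rw [htop0] at *
      simp [hlead, hrun]
    | cons hd1 rest2 =>
      obtain ⟨n1, s1⟩ := hd1
      have hmem1 : (n1, s1) ∈ l := hperm.mem_iff.1 (by simp)
      have hs1pos : 1 ≤ s1 := hpos _ hmem1
      have hs1le : s1 ≤ s0 := hmax0 _ hmem1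
      obtain ⟨hpw0, hpwt⟩ := List.pairwise_cons.1 hpw
      obtain ⟨hpw1, -⟩ := List.pairwise_cons.1 hpwt
      have hn0n1 : n0 ≠ n1 := by
        have hndS : (((n0, s0) :: (n1, s1) :: rest2).map Prod.fst).Nodup :=
          ((hperm.map Prod.fst).nodup_iff).2 hnd
        obtain ⟨hn0, -⟩ := List.nodup_cons.1 hndS
        intro h
        exact hn0 (h ▸ List.mem_cons_self ..)
      have hleaders : pvLeaders l
          = (((n0, s0) :: (n1, s1) :: rest2).filter (fun y => y.2 == s0)).map Prod.fst := by
        unfold pvLeaders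
        rw [htop, hstab s0]
      by_cases hs1s0 : s1 = s0
      · -- a tie at the top: both sides return the tied leaders, nothing appended
        subst hs1s0
        have hsel : ((n0, s1) :: (n1, s1) :: rest2).filter (fun y => y.2 == s1) =
            (n0, s1) :: (n1, s1) :: rest2.filter (fun y => y.2 == s1) := by
          simp
        have hcond : max 1 (s1 - 1) ≤ s1 := by omega
        have hlen : ((pvLeaders l).length == 1) = false := by
          rw [hleaders, hsel]
          simp
        unfold pvFinishB
        simp only [htop0, hlen, Bool.false_eq_true, if_false]
        rw [hleaders, hsel]
        simp [hcond]
      · -- unique leader: both sides consider the runner-up (n1, s1)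
        have hs1lt : s1 < s0 := lt_of_le_of_ne hs1le hs1s0
        have hFnil : ((n1, s1) :: rest2).filter (fun y => y.2 == s0) = [] := by
          rw [List.filter_eq_nil_iff]
          intro z hz
          have : z.2 ≤ s1 := by
            rcases List.mem_cons.1 hz with rfl | hz'
            · exact le_refl _
            · exact hpw1 z hz'
          simp only [beq_iff_eq]
          omega
        have hsel : ((n0, s0) :: (n1, s1) :: rest2).filter (fun y => y.2 == s0) = [(n0, s0)] := by
          simp [hFnil]
        have hmemR : (n1, s1) ∈ l.filter (fun x => decide (x.2 < s0)) :=
          List.mem_filter.2 ⟨hmem1, by simp [hs1lt]⟩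
        obtain ⟨r, hr⟩ : ∃ r, PySem.List.max? (l.filter (fun x => decide (x.2 < s0)))
            (fun it => it.2) = some r := by
          cases hmx : PySem.List.max? (l.filter (fun x => decide (x.2 < s0))) (fun it => it.2) with
          | none =>
            exfalso
            have hre := (PySem.List.max?_eq_none_iff _ _).1 hmx
            rw [hre] at hmemR
            exact List.not_mem_nil hmemR
          | some r => exact ⟨r, rfl⟩
        have hrR := PySem.List.max?_mem hr
        have hrl : r ∈ l := (List.mem_filter.1 hrR).1
        have hrlt : r.2 < s0 := by simpa using (List.mem_filter.1 hrR).2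
        have hrle : r.2 ≤ s1 := by
          have hrS : r ∈ (n0, s0) :: (n1, s1) :: rest2 := hperm.mem_iff.2 hrl
          rcases List.mem_cons.1 hrS with rfl | hrS'
          · omega
          rcases List.mem_cons.1 hrS' with rfl | hrS''
          · exact le_refl _
          · exact hpw1 r hrS''
        have hr2 : r.2 = s1 := le_antisymm hrle (PySem.List.max?_isMax hr (n1, s1) hmemR)
        obtain ⟨t, htf⟩ := max?_head_filter (l.filter (fun x => decide (x.2 < s0))) (fun it => it.2) r hr
        have hRf : (l.filter (fun x => decide (x.2 < s0))).filter (fun x => x.2 == r.2)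
            = l.filter (fun y => y.2 == s1) := by
          rw [hr2, List.filter_filter]
          apply List.filter_congr
          intro a ha
          by_cases h : a.2 = s1
          · simp [h, hs1lt]
          · simp [h]
        have hlf1 : l.filter (fun y => y.2 == s1) =
            (n1, s1) :: rest2.filter (fun y => y.2 == s1) := by
          rw [← hstab s1]
          have hne : ¬ s0 = s1 := by omega
          simp [hne]
        have hrn1 : r = (n1, s1) := by
          have hcons : r :: t = (n1, s1) :: rest2.filter (fun y => y.2 == s1) := by
            rw [← htf, hRf, hlf1]
          exact (List.cons_eq_cons.1 hcons).1
        have hrun : pvRunner l = some (n1, s1) := by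
          unfold pvRunner
          rw [htop, hr, hrn1]
        have hlen : ((pvLeaders l).length == 1) = true := by
          rw [hleaders, hsel]; simp
        have hne10 : ¬ n1 = n0 := fun h => hn0n1 h.symm
        unfold pvFinishB
        simp only [htop0, Bool.false_eq_true, if_false, hlen, if_true]
        rw [hleaders, hsel, hrun, htop]
        by_cases hth : max 1 (s0 - 1) ≤ s1 <;> simp [hth, hne10]

-- the shared score function view: A's dict route and Source B's loop agree for any lowered prompt
theorem main_eq (p : String) :
    pvTailA ((SPECIALISTS.foldl (fun d sk =>
      if 0 < ((sk.2.countP (fun kw => PySem.Str.isIn kw p) : Nat) : Int)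
      then d.insert sk.1 ((sk.2.countP (fun kw => PySem.Str.isIn kw p) : Nat) : Int) else d)
      PySem.Dict.empty).items)
    = pvFinishB (SPECIALISTS.foldl (fun st sk =>
        pvStepB st sk.1 ((sk.2.countP (fun kw => PySem.Str.isIn kw p) : Nat) : Int))
        ((0 : Int), ([] : List String), (none : Option (String × Int)))) := by
  have hnd : (SPECIALISTS.map Prod.fst).Nodup := by decide
  have hitems : (SPECIALISTS.foldl (fun d sk =>
      if 0 < ((sk.2.countP (fun kw => PySem.Str.isIn kw p) : Nat) : Int)
      then d.insert sk.1 ((sk.2.countP (fun kw => PySem.Str.isIn kw p) : Nat) : Int) else d)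
      PySem.Dict.empty).items
      = (PySem.Dict.empty : PySem.Dict String Int).items
        ++ pvItems (fun sk => ((sk.2.countP (fun kw => PySem.Str.isIn kw p) : Nat) : Int)) SPECIALISTS :=
    dict_items_eq (fun sk => ((sk.2.countP (fun kw => PySem.Str.isIn kw p) : Nat) : Int))
      SPECIALISTS PySem.Dict.empty
      (by intro sk _ h; simp [PySem.Dict.empty, PySem.Dict.keys] at h) hnd
  have hfold : SPECIALISTS.foldl (fun st sk =>
      pvStepB st sk.1 ((sk.2.countP (fun kw => PySem.Str.isIn kw p) : Nat) : Int))
      ((0 : Int), ([] : List String), (none : Option (String × Int)))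
      = (pvTop (pvItems (fun sk => ((sk.2.countP (fun kw => PySem.Str.isIn kw p) : Nat) : Int)) SPECIALISTS),
         pvLeaders (pvItems (fun sk => ((sk.2.countP (fun kw => PySem.Str.isIn kw p) : Nat) : Int)) SPECIALISTS),
         pvRunner (pvItems (fun sk => ((sk.2.countP (fun kw => PySem.Str.isIn kw p) : Nat) : Int)) SPECIALISTS)) :=
    foldB_spec (fun sk => ((sk.2.countP (fun kw => PySem.Str.isIn kw p) : Nat) : Int))
      (fun sk => Int.natCast_nonneg _) SPECIALISTS
  rw [hitems, hfold]
  have hemp : (PySem.Dict.empty : PySem.Dict String Int).items = [] := rfl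
  rw [hemp, List.nil_append]
  exact tail_eq _ (pvItems_pos _ SPECIALISTS)
    (List.Sublist.nodup (pvItems_fst_sublist _ SPECIALISTS) hnd)

-- ===== VERDICT (by name: the statement is the Claim_ definition above) =====
theorem route_prompt_spec : Claim_equal_route_prompt := by
  intro prompt _
  show route_prompt prompt = route_prompt_alt prompt
  simp only [route_prompt, route_prompt_alt, score_eq]
  exact main_eq (PySem.Str.lower prompt)
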